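-- pv_equiv track=rewrite | github.com/artTerexov/InfEGE | Artem/task27/5036.py | nonOptimal
-- ===== SOURCE A (Python) =====
-- def nonOptimal(a):
--     m = 9999999
--     for i in range(len(a)):
--         c = len(a) // 2 * a[i - len(a) // 2]
--         for j in range(1, len(a) // 2):
--             c += j * a[(i + j) - len(a)] + j * a[i - j]
--         if m > c:
--             m = c
--             h = i + 1
--     return h
-- ===== SOURCE B (Python) =====
-- def nonOptimal(a):
--     n = len(a)
--     half = n // 2
--     # cost(i) = sum_{d=-half}^{half-1} |d| * a[(i+d) % n]; maintained incrementally: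
--     # moving i -> i+1 subtracts the inner right window, adds the inner left window,
--     # and exchanges the two boundary terms, so the whole scan is O(n).
--     c = sum(abs(d) * a[d % n] for d in range(-half, half))
--     sp = sum(a[e % n] for e in range(1, half))         # a[(i+1)%n .. (i+half-1)%n]
--     sm = sum(a[e % n] for e in range(-half + 1, 1))    # a[(i-half+1)%n .. i%n]
--     best_c, best_i = c, 0
--     for i in range(1, n):
--         c += (half - 1) * a[(i - 1 + half) % n] - half * a[(i - 1 - half) % n] - sp + sm
--         sp += a[(i + half - 1) % n] - a[i % n]
--         sm += a[i % n] - a[(i - half) % n]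
--         if c < best_c:
--             best_c, best_i = c, i
--     return best_i + 1
-- ===== Notes on version B (the rewrite author's own statement) =====
-- stated objective: faster
-- what changed: B computes the circular triangular-weighted cost of index 0 once and then updates it in O(1) per index by a rolling delta (two sliding inner-window sums plus two boundary terms), tracking the running minimum, instead of A's full weighted inner loop per index.
import Mathlib
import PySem

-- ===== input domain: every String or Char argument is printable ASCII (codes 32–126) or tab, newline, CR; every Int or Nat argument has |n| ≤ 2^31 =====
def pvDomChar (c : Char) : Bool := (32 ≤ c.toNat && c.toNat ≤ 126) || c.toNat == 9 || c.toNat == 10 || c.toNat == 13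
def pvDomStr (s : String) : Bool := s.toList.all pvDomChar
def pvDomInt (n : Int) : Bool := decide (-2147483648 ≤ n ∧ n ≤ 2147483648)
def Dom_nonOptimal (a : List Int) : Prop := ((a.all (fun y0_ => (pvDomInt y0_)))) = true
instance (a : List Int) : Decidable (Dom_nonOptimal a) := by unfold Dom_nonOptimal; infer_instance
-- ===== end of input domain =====

-- B computes the triangular-weighted circular cost of index 0 once and then updates it in O(1)
-- per step (rolling delta with two sliding inner-window sums), an O(n) algorithm vs A's O(n^2).

-- ===== PORT A =====
def nonOptimal (a : List Int) : Int :=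
  let n : Int := a.length
  let st := (PySem.List.pyRange 0 n 1).foldl (fun (st : Int × Option Int) i =>
    let c0 := PySem.Int.floordiv n 2 * PySem.List.pyGetD a (i - PySem.Int.floordiv n 2) 0
    let c := (PySem.List.pyRange 1 (PySem.Int.floordiv n 2) 1).foldl
      (fun c j => c + j * PySem.List.pyGetD a ((i + j) - n) 0 + j * PySem.List.pyGetD a (i - j) 0) c0
    if st.1 > c then (c, some (i + 1)) else st) ((9999999 : Int), (none : Option Int))
  st.2.getD 0    -- Python raises NameError when h was never assigned; those inputs are outside Pre_

-- ===== PORT B =====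
def nonOptimal_alt (a : List Int) : Int :=
  let n : Int := a.length
  let half := PySem.Int.floordiv n 2
  let c0 := ((PySem.List.pyRange (-half) half 1).map
    (fun d => |d| * PySem.List.pyGetD a (PySem.Int.mod d n) 0)).sum
  let sp0 := ((PySem.List.pyRange 1 half 1).map
    (fun e => PySem.List.pyGetD a (PySem.Int.mod e n) 0)).sum
  let sm0 := ((PySem.List.pyRange (-half + 1) 1 1).map
    (fun e => PySem.List.pyGetD a (PySem.Int.mod e n) 0)).sum
  let st := (PySem.List.pyRange 1 n 1).foldl
    (fun (st : Int × Int × Int × Int × Int) i =>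
      let c := st.1 + (half - 1) * PySem.List.pyGetD a (PySem.Int.mod (i - 1 + half) n) 0
                 - half * PySem.List.pyGetD a (PySem.Int.mod (i - 1 - half) n) 0
                 - st.2.1 + st.2.2.1
      let sp := st.2.1 + PySem.List.pyGetD a (PySem.Int.mod (i + half - 1) n) 0
                 - PySem.List.pyGetD a (PySem.Int.mod i n) 0
      let sm := st.2.2.1 + PySem.List.pyGetD a (PySem.Int.mod i n) 0
                 - PySem.List.pyGetD a (PySem.Int.mod (i - half) n) 0
      if c < st.2.2.2.1 then (c, sp, sm, c, i) else (c, sp, sm, st.2.2.2.1, st.2.2.2.2))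
    (c0, sp0, sm0, c0, 0)
  st.2.2.2.2 + 1

-- ===== PRECONDITION & SPEC =====
-- the triangular-weighted circular cost of rotation i (a spec-level formula; used only by Pre_)
def pvCost (a : List Int) (i : Int) : Int :=
  let n : Int := a.length
  ((PySem.List.pyRange (-(n / 2)) (n / 2) 1).map
    (fun d => |d| * PySem.List.pyGetD a ((i + d) % n) 0)).sum

-- Pre_ excludes exactly the inputs where A raises NameError: the empty list and lists where every
-- rotation cost is ≥ the sentinel 9999999 (then h is never assigned).
def Pre_nonOptimal (a : List Int) : Prop :=
  a ≠ [] ∧ ∃ i < a.length, pvCost a (i : Int) < 9999999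
instance (a : List Int) : Decidable (Pre_nonOptimal a) := by unfold Pre_nonOptimal; infer_instance

def pvWitness_nonOptimal : List Int := [3, 1, 4, 1, 5]

def Spec_nonOptimal (a : List Int) (out : Int) : Prop := out = nonOptimal_alt a
instance (a : List Int) (out : Int) : Decidable (Spec_nonOptimal a out) := by unfold Spec_nonOptimal; infer_instance

-- ===== CLAIM (what is proved, stated in full; the proofs are below) =====
def Claim_equal_nonOptimal : Prop := ∀ (a : List Int), Dom_nonOptimal a → Pre_nonOptimal a → Spec_nonOptimal a (nonOptimal a)

-- ===== LEMMAS AND PROOFS =====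

-- the two inner-window sums B maintains (proof-level formulas)
def pvSp (a : List Int) (i : Int) : Int :=
  ((PySem.List.pyRange 1 ((a.length : Int) / 2) 1).map
    (fun e => PySem.List.pyGetD a ((i + e) % (a.length : Int)) 0)).sum
def pvSm (a : List Int) (i : Int) : Int :=
  ((PySem.List.pyRange (-((a.length : Int) / 2) + 1) 1 1).map
    (fun e => PySem.List.pyGetD a ((i + e) % (a.length : Int)) 0)).sum

-- Python's wraparound read a[t] (for -n ≤ t < n) is the circular read a[t % n]
lemma modGet (a : List Int) (t : Int) (h1 : -(a.length : Int) ≤ t) (h2 : t < (a.length : Int)) :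
    PySem.List.pyGetD a t 0 = PySem.List.pyGetD a (t % (a.length : Int)) 0 := by
  by_cases ht : 0 ≤ t
  · rw [Int.emod_eq_of_lt ht h2]
  · have hn : 0 < (a.length : Int) := by omega
    have e1 : t % (a.length : Int) = t + a.length := by
      have h' : (t + (a.length : Int) * 1) % (a.length : Int) = t % (a.length : Int) :=
        Int.add_mul_emod_self_left _ _ _
      rw [mul_one] at h'
      rw [← h', Int.emod_eq_of_lt (by omega) (by omega)]
    have hk1 : 0 < (-t).toNat := by omega
    have hk2 : (-t).toNat ≤ a.length := by omega
    have eL : PySem.List.pyGetD a t 0 = a[a.length - (-t).toNat]'(by omega) := by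
      have e2 : t = -(((-t).toNat : Nat) : Int) := by omega
      conv_lhs => rw [e2]
      exact PySem.List.pyGetD_neg_natCast a (-t).toNat 0 hk1 hk2
    have eR : PySem.List.pyGetD a (t % (a.length : Int)) 0
        = a[(t + (a.length : Int)).toNat]'(by omega) := by
      rw [e1]
      exact PySem.List.pyGetD_eq_getElem a 0 (by omega) (by omega)
    rw [eL, eR]
    congr 1
    omega

-- reindex a sum over the negative offsets -M..-1 to positive 1..M
lemma sum_pyRange_negNat (F : Int → Int) (M : Nat) :
    ((PySem.List.pyRange (-(M : Int)) 0 1).map F).sum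
    = ((PySem.List.pyRange 1 ((M : Int) + 1) 1).map (fun j => F (-j))).sum := by
  induction M with
  | zero =>
    rw [show -((0 : Nat) : Int) = 0 by norm_num, show (((0 : Nat) : Int) + 1) = 1 by norm_num]
    rw [PySem.List.pyRange_one_eq_nil (le_refl (0 : Int)),
      PySem.List.pyRange_one_eq_nil (le_refl (1 : Int))]
    rfl
  | succ M ih =>
    have hc : ((M + 1 : Nat) : Int) = (M : Int) + 1 := by push_cast; ring
    rw [hc, PySem.List.pyRange_one_cons (by omega : -((M : Int) + 1) < 0),
      show -((M : Int) + 1) + 1 = -(M : Int) by ring,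
      PySem.List.pyRange_one_succ_right (by omega : (1 : Int) ≤ (M : Int) + 1)]
    simp only [List.map_cons, List.sum_cons, List.map_append, List.sum_append,
      List.map_nil, List.sum_nil, add_zero, ih]
    ring

lemma sum_pyRange_neg (F : Int → Int) (m : Int) (hm : 0 ≤ m) :
    ((PySem.List.pyRange (-m) 0 1).map F).sum
    = ((PySem.List.pyRange 1 (m + 1) 1).map (fun j => F (-j))).sum := by
  obtain ⟨M, rfl⟩ : ∃ M : Nat, m = (M : Int) := ⟨m.toNat, by omega⟩
  exact sum_pyRange_negNat F M

-- shift the index range of a map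
lemma map_pyRange_shift (F : Int → Int) (lo hi s : Int) :
    (PySem.List.pyRange (lo + s) (hi + s) 1).map F
    = (PySem.List.pyRange lo hi 1).map (fun e => F (e + s)) := by
  rw [PySem.List.pyRange_one, PySem.List.pyRange_one,
    show hi + s - (lo + s) = hi - lo by ring, List.map_map, List.map_map]
  apply List.map_congr_left
  intro k _
  simp only [Function.comp]
  ring_nf

-- per-index equality: A's inner loop computes the |d|-weighted circular window sum
lemma costEq (a : List Int) (i : Int) (hi0 : 0 ≤ i) (hin : i < (a.length : Int)) :
    (PySem.List.pyRange 1 (PySem.Int.floordiv (a.length : Int) 2) 1).foldl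
      (fun c j => c + j * PySem.List.pyGetD a ((i + j) - (a.length : Int)) 0
                    + j * PySem.List.pyGetD a (i - j) 0)
      (PySem.Int.floordiv (a.length : Int) 2
        * PySem.List.pyGetD a (i - PySem.Int.floordiv (a.length : Int) 2) 0)
    = pvCost a i := by
  have hn : 0 < (a.length : Int) := by omega
  have hf2 : PySem.Int.floordiv (a.length : Int) 2 = (a.length : Int) / 2 :=
    PySem.Int.floordiv_eq_ediv_of_pos (by norm_num)
  rw [hf2]
  simp only [pvCost]
  by_cases hm1 : (a.length : Int) / 2 = 0
  · rw [hm1, PySem.List.pyRange_one_eq_nil (by norm_num : (0 : Int) ≤ 1),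
      show -(0 : Int) = 0 by norm_num, PySem.List.pyRange_one_eq_nil (le_refl (0 : Int))]
    simp
  · have hm0 : 0 < (a.length : Int) / 2 := by omega
    have hmn : (a.length : Int) / 2 < (a.length : Int) := by omega
    have h2m : 2 * ((a.length : Int) / 2) ≤ (a.length : Int) := by omega
    rw [PySem.List.foldl_congr_mem _ _
        (fun c j => c + (j * PySem.List.pyGetD a ((i + j) - (a.length : Int)) 0
                       + j * PySem.List.pyGetD a (i - j) 0)) _
        (fun acc x _ => by ring)]
    rw [PySem.List.foldl_add]
    rw [PySem.List.pyRange_one_append (-((a.length : Int) / 2)) 0 ((a.length : Int) / 2)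
        (by omega) (by omega), List.map_append, List.sum_append]
    rw [sum_pyRange_neg _ ((a.length : Int) / 2) (by omega)]
    rw [PySem.List.pyRange_one_succ_right (by omega : (1 : Int) ≤ (a.length : Int) / 2),
      List.map_append, List.sum_append]
    rw [PySem.List.pyRange_one_append 0 1 ((a.length : Int) / 2) (by omega) (by omega),
      List.map_append, List.sum_append]
    rw [show PySem.List.pyRange 0 1 1 = [0] from rfl]
    simp only [List.map_cons, List.map_nil, List.sum_cons, List.sum_nil, add_zero,
      abs_zero, zero_mul, zero_add]
    have hpt : ∀ j ∈ PySem.List.pyRange 1 ((a.length : Int) / 2) 1,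
        (j * PySem.List.pyGetD a ((i + j) - (a.length : Int)) 0
         + j * PySem.List.pyGetD a (i - j) 0)
        = (|(-j)| * PySem.List.pyGetD a ((i + -j) % (a.length : Int)) 0
           + |j| * PySem.List.pyGetD a ((i + j) % (a.length : Int)) 0) := by
      intro j hj
      rw [PySem.List.mem_pyRange_one] at hj
      obtain ⟨hj1, hj2⟩ := hj
      rw [abs_neg, abs_of_pos (by omega : (0 : Int) < j),
        modGet a ((i + j) - (a.length : Int)) (by omega) (by omega),
        Int.sub_emod_right, show i - j = i + -j by ring,
        modGet a (i + -j) (by omega) (by omega)]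
      ring
    rw [List.map_congr_left hpt, PySem.List.sum_map_add_int]
    have eInit : PySem.List.pyGetD a (i - (a.length : Int) / 2) 0
        = PySem.List.pyGetD a ((i + -((a.length : Int) / 2)) % (a.length : Int)) 0 := by
      rw [show i - (a.length : Int) / 2 = i + -((a.length : Int) / 2) by ring]
      exact modGet a _ (by omega) (by omega)
    rw [eInit, show |(-((a.length : Int) / 2))| = (a.length : Int) / 2 from by
      rw [abs_neg]; exact abs_of_pos (by omega)]
    ring

-- Python's min on a nonempty list, extended by one element on the right
lemma min?_snoc (L : List Int) (v mv : Int)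
    (h : PySem.List.min? L (fun x => x) = some mv) :
    PySem.List.min? (L ++ [v]) (fun x => x) = some (min mv v) := by
  cases L with
  | nil =>
    rw [(PySem.List.min?_eq_none_iff ([] : List Int) (fun x => x)).mpr rfl] at h
    cases h
  | cons x xs =>
    rw [PySem.List.min?_id_cons] at h
    have hmv : mv = xs.foldl min x := by cases h; rfl
    rw [show (x :: xs) ++ [v] = x :: (xs ++ [v]) from rfl, PySem.List.min?_id_cons,
      List.foldl_append, hmv]
    simp

-- characterization of A's sentinel-update loop by min? / index?
lemma loopA_char (f : Int → Int) (k : Nat) :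
    (PySem.List.pyRange 0 (k : Int) 1).foldl
      (fun (st : Int × Option Int) i => if st.1 > f i then (f i, some (i + 1)) else st)
      ((9999999 : Int), (none : Option Int))
    = match PySem.List.min? ((PySem.List.pyRange 0 (k : Int) 1).map f) (fun x => x) with
      | none => ((9999999 : Int), (none : Option Int))
      | some mv => if mv < 9999999
          then (mv, some (((PySem.List.index? ((PySem.List.pyRange 0 (k : Int) 1).map f) mv).getD 0 : Int) + 1))
          else ((9999999 : Int), (none : Option Int)) := by
  induction k with
  | zero =>
    rw [show ((0 : Nat) : Int) = 0 from rfl, PySem.List.pyRange_one_eq_nil (le_refl (0 : Int))]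
    rfl
  | succ k ih =>
    have hcast : ((k + 1 : Nat) : Int) = (k : Int) + 1 := by push_cast; ring
    rw [hcast, PySem.List.pyRange_one_succ_right (by positivity : (0 : Int) ≤ (k : Int)),
      List.foldl_append, List.map_append, ih]
    simp only [List.map_cons, List.map_nil, List.foldl_cons, List.foldl_nil]
    cases hmin : PySem.List.min? ((PySem.List.pyRange 0 (k : Int) 1).map f) (fun x => x) with
    | none =>
      have hLnil : (PySem.List.pyRange 0 (k : Int) 1).map f = [] :=
        (PySem.List.min?_eq_none_iff _ _).mp hmin
      have hk0 : k = 0 := by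
        have hlen := congrArg List.length hLnil
        simp only [List.length_map, PySem.List.length_pyRange_one, List.length_nil] at hlen
        omega
      subst hk0
      rw [hLnil]
      simp only [List.nil_append]
      rw [show PySem.List.min? [f ((0 : Nat) : Int)] (fun x => x)
            = some (List.foldl min (f ((0 : Nat) : Int)) []) from PySem.List.min?_id_cons _ _]
      simp only [List.foldl_nil]
      by_cases hv : f ((0 : Nat) : Int) < 9999999
      · rw [if_pos (show (9999999 : Int) > f ((0 : Nat) : Int) from hv), if_pos hv,
          PySem.List.index?_cons_self]
        norm_num
      · rw [if_neg (show ¬ (9999999 : Int) > f ((0 : Nat) : Int) from by omega), if_neg hv]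
    | some mv =>
      have hmem : mv ∈ (PySem.List.pyRange 0 (k : Int) 1).map f := PySem.List.min?_mem hmin
      have hmn : ∀ y ∈ (PySem.List.pyRange 0 (k : Int) 1).map f, mv ≤ y :=
        PySem.List.min?_isMin hmin
      rw [min?_snoc _ (f (k : Int)) mv hmin]
      by_cases hvm : f (k : Int) < mv
      · have hnot : f (k : Int) ∉ (PySem.List.pyRange 0 (k : Int) 1).map f :=
          fun hc => absurd (hmn _ hc) (by omega)
        rw [min_eq_right (le_of_lt hvm)]
        simp only []
        rw [PySem.List.index?_append_singleton_self _ _ hnot]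
        by_cases hm9 : mv < 9999999
        · have hv9 : f (k : Int) < 9999999 := by omega
          simp [hm9, hvm, hv9]
        · by_cases hv9 : f (k : Int) < 9999999
          · simp [hm9, hv9]
          · simp [hm9, hv9]
      · rw [min_eq_left (not_lt.mp hvm)]
        simp only []
        rw [PySem.List.index?_append_of_mem [f (k : Int)] hmem]
        by_cases hm9 : mv < 9999999
        · have hng : ¬ f (k : Int) < mv := by omega
          simp [hm9, hng]
        · have hng : ¬ f (k : Int) < 9999999 := by omega
          simp [hm9, hng]

lemma window_shift (F : Int → Int) (lo hi : Int) (hlh : lo ≤ hi) :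
    ((PySem.List.pyRange lo hi 1).map F).sum
    = ((PySem.List.pyRange (lo - 1) (hi - 1) 1).map F).sum + F (hi - 1) - F (lo - 1) := by
  have h1 : PySem.List.pyRange (lo - 1) hi 1 = (lo - 1) :: PySem.List.pyRange lo hi 1 := by
    rw [PySem.List.pyRange_one_cons (by omega : lo - 1 < hi), sub_add_cancel]
  have h2 : PySem.List.pyRange (lo - 1) hi 1
      = PySem.List.pyRange (lo - 1) (hi - 1) 1 ++ [hi - 1] := by
    rw [show hi = (hi - 1) + 1 by ring, PySem.List.pyRange_one_succ_right (by omega : lo - 1 ≤ hi - 1)]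
    ring_nf
  have := congrArg (fun L => (L.map F).sum) (h1.symm.trans h2)
  simp only [List.map_cons, List.sum_cons, List.map_append, List.sum_append,
    List.map_nil, List.sum_nil, add_zero] at this
  omega

-- shift the index range of a map

lemma spStep (a : List Int) (i : Int) (hn : 2 ≤ (a.length : Int)) :
    pvSp a i = pvSp a (i - 1)
      + PySem.List.pyGetD a ((i + (a.length : Int) / 2 - 1) % (a.length : Int)) 0
      - PySem.List.pyGetD a (i % (a.length : Int)) 0 := by
  have hh : 1 ≤ (a.length : Int) / 2 := by omega
  simp only [pvSp]
  have hshift : ((PySem.List.pyRange 1 ((a.length : Int) / 2) 1).map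
      (fun e => PySem.List.pyGetD a ((i - 1 + e) % (a.length : Int)) 0)).sum
      = ((PySem.List.pyRange 0 ((a.length : Int) / 2 - 1) 1).map
      (fun e => PySem.List.pyGetD a ((i + e) % (a.length : Int)) 0)).sum := by
    rw [show PySem.List.pyRange 1 ((a.length : Int) / 2) 1
        = PySem.List.pyRange (0 + 1) (((a.length : Int) / 2 - 1) + 1) 1 by norm_num,
      map_pyRange_shift]
    apply congrArg
    apply List.map_congr_left
    intro e _
    rw [show i - 1 + (e + 1) = i + e by ring]
  rw [hshift, window_shift _ 1 ((a.length : Int) / 2) hh]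
  rw [show (1 : Int) - 1 = 0 by ring]
  rw [show i + 0 = i by ring, show i + ((a.length : Int) / 2 - 1) = i + (a.length : Int) / 2 - 1 by ring]

lemma smStep (a : List Int) (i : Int) (hn : 2 ≤ (a.length : Int)) :
    pvSm a i = pvSm a (i - 1)
      + PySem.List.pyGetD a (i % (a.length : Int)) 0
      - PySem.List.pyGetD a ((i - (a.length : Int) / 2) % (a.length : Int)) 0 := by
  have hh : 1 ≤ (a.length : Int) / 2 := by omega
  simp only [pvSm]
  have hshift : ((PySem.List.pyRange (-((a.length : Int) / 2) + 1) 1 1).map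
      (fun e => PySem.List.pyGetD a ((i - 1 + e) % (a.length : Int)) 0)).sum
      = ((PySem.List.pyRange (-((a.length : Int) / 2)) 0 1).map
      (fun e => PySem.List.pyGetD a ((i + e) % (a.length : Int)) 0)).sum := by
    rw [show PySem.List.pyRange (-((a.length : Int) / 2) + 1) 1 1
        = PySem.List.pyRange (-((a.length : Int) / 2) + 1) (0 + 1) 1 by norm_num,
      map_pyRange_shift]
    apply congrArg
    apply List.map_congr_left
    intro e _
    rw [show i - 1 + (e + 1) = i + e by ring]
  rw [hshift, window_shift _ (-((a.length : Int) / 2) + 1) 1 (by omega)]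
  rw [show -((a.length : Int) / 2) + 1 - 1 = -((a.length : Int) / 2) by ring,
    show (1 : Int) - 1 = 0 by ring, show i + 0 = i by ring,
    show i + -((a.length : Int) / 2) = i - (a.length : Int) / 2 by ring]

lemma tri_delta (G : Int → Int) (h : Int) (hh : 1 ≤ h) :
    ((PySem.List.pyRange (-h) h 1).map (fun d => |d| * G d)).sum
    = ((PySem.List.pyRange (-h) h 1).map (fun d => |d| * G (d - 1))).sum
      + (h - 1) * G (h - 1) - h * G (-h - 1)
      - ((PySem.List.pyRange 0 (h - 1) 1).map G).sum
      + ((PySem.List.pyRange (-h) 0 1).map G).sum := by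
  have hprev : ((PySem.List.pyRange (-h) h 1).map (fun d => |d| * G (d - 1))).sum
      = h * G (-h - 1)
        + ((PySem.List.pyRange (-h) (h - 1) 1).map (fun e => |e + 1| * G e)).sum := by
    rw [show PySem.List.pyRange (-h) h 1
        = PySem.List.pyRange ((-h - 1) + 1) ((h - 1) + 1) 1 by norm_num,
      map_pyRange_shift, PySem.List.pyRange_one_cons (by omega : -h - 1 < h - 1)]
    simp only [List.map_cons, List.sum_cons]
    rw [show -h - 1 + 1 = -h by ring, abs_neg, abs_of_pos (by omega : (0 : Int) < h)]
    apply congrArg (fun z => h * G (-h - 1) + z)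
    apply congrArg
    apply List.map_congr_left
    intro e _
    rw [show e + 1 - 1 = e by ring]
  have hcur : ((PySem.List.pyRange (-h) h 1).map (fun d => |d| * G d)).sum
      = ((PySem.List.pyRange (-h) (h - 1) 1).map (fun d => |d| * G d)).sum
        + (h - 1) * G (h - 1) := by
    rw [show PySem.List.pyRange (-h) h 1
        = PySem.List.pyRange (-h) ((h - 1) + 1) 1 by norm_num,
      PySem.List.pyRange_one_succ_right (by omega : -h ≤ h - 1),
      List.map_append, List.sum_append]
    simp only [List.map_cons, List.map_nil, List.sum_cons, List.sum_nil, add_zero]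
    rw [abs_of_nonneg (by omega : (0 : Int) ≤ h - 1)]
  have hsplit1 : ((PySem.List.pyRange (-h) (h - 1) 1).map (fun d => |d| * G d)).sum
      = ((PySem.List.pyRange (-h) 0 1).map (fun d => |d| * G d)).sum
        + ((PySem.List.pyRange 0 (h - 1) 1).map (fun d => |d| * G d)).sum := by
    rw [PySem.List.pyRange_one_append (-h) 0 (h - 1) (by omega) (by omega),
      List.map_append, List.sum_append]
  have hsplit2 : ((PySem.List.pyRange (-h) (h - 1) 1).map (fun e => |e + 1| * G e)).sum
      = ((PySem.List.pyRange (-h) 0 1).map (fun e => |e + 1| * G e)).sum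
        + ((PySem.List.pyRange 0 (h - 1) 1).map (fun e => |e + 1| * G e)).sum := by
    rw [PySem.List.pyRange_one_append (-h) 0 (h - 1) (by omega) (by omega),
      List.map_append, List.sum_append]
  have e1 : ((PySem.List.pyRange (-h) 0 1).map (fun d => |d| * G d)).sum
      = ((PySem.List.pyRange (-h) 0 1).map (fun d => |d + 1| * G d)).sum
        + ((PySem.List.pyRange (-h) 0 1).map G).sum := by
    rw [← PySem.List.sum_map_add_int]
    apply congrArg
    apply List.map_congr_left
    intro d hd
    rw [PySem.List.mem_pyRange_one] at hd
    rw [abs_of_neg (by omega : d < 0), abs_of_nonpos (by omega : d + 1 ≤ 0)]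
    ring
  have e2 : ((PySem.List.pyRange 0 (h - 1) 1).map (fun d => |d + 1| * G d)).sum
      = ((PySem.List.pyRange 0 (h - 1) 1).map (fun d => |d| * G d)).sum
        + ((PySem.List.pyRange 0 (h - 1) 1).map G).sum := by
    rw [← PySem.List.sum_map_add_int]
    apply congrArg
    apply List.map_congr_left
    intro d hd
    rw [PySem.List.mem_pyRange_one] at hd
    rw [abs_of_nonneg (by omega : (0 : Int) ≤ d), abs_of_nonneg (by omega : (0 : Int) ≤ d + 1)]
    ring
  rw [hprev, hcur, hsplit1, hsplit2, e1, e2]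
  ring

lemma costStep (a : List Int) (i : Int) (hn : 2 ≤ (a.length : Int)) :
    pvCost a i = pvCost a (i - 1)
      + ((a.length : Int) / 2 - 1) * PySem.List.pyGetD a ((i - 1 + (a.length : Int) / 2) % (a.length : Int)) 0
      - (a.length : Int) / 2 * PySem.List.pyGetD a ((i - 1 - (a.length : Int) / 2) % (a.length : Int)) 0
      - pvSp a (i - 1) + pvSm a (i - 1) := by
  have hh : 1 ≤ (a.length : Int) / 2 := by omega
  simp only [pvCost, pvSp, pvSm]
  rw [tri_delta (fun d => PySem.List.pyGetD a ((i + d) % (a.length : Int)) 0)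
      ((a.length : Int) / 2) hh]
  have h1 : ((PySem.List.pyRange (-((a.length : Int) / 2)) ((a.length : Int) / 2) 1).map
      (fun d => |d| * PySem.List.pyGetD a ((i + (d - 1)) % (a.length : Int)) 0)).sum
      = ((PySem.List.pyRange (-((a.length : Int) / 2)) ((a.length : Int) / 2) 1).map
      (fun d => |d| * PySem.List.pyGetD a ((i - 1 + d) % (a.length : Int)) 0)).sum := by
    apply congrArg
    apply List.map_congr_left
    intro d _
    rw [show i + (d - 1) = i - 1 + d by ring]
  have h4 : ((PySem.List.pyRange 0 ((a.length : Int) / 2 - 1) 1).map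
      (fun e => PySem.List.pyGetD a ((i + e) % (a.length : Int)) 0)).sum
      = ((PySem.List.pyRange 1 ((a.length : Int) / 2) 1).map
      (fun e => PySem.List.pyGetD a ((i - 1 + e) % (a.length : Int)) 0)).sum := by
    rw [show PySem.List.pyRange 1 ((a.length : Int) / 2) 1
        = PySem.List.pyRange (0 + 1) (((a.length : Int) / 2 - 1) + 1) 1 by norm_num,
      map_pyRange_shift]
    apply congrArg
    apply List.map_congr_left
    intro e _
    rw [show i - 1 + (e + 1) = i + e by ring]
  have h5 : ((PySem.List.pyRange (-((a.length : Int) / 2)) 0 1).map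
      (fun e => PySem.List.pyGetD a ((i + e) % (a.length : Int)) 0)).sum
      = ((PySem.List.pyRange (-((a.length : Int) / 2) + 1) 1 1).map
      (fun e => PySem.List.pyGetD a ((i - 1 + e) % (a.length : Int)) 0)).sum := by
    rw [show PySem.List.pyRange (-((a.length : Int) / 2) + 1) 1 1
        = PySem.List.pyRange (-((a.length : Int) / 2) + 1) (0 + 1) 1 by norm_num,
      map_pyRange_shift]
    apply congrArg
    apply List.map_congr_left
    intro e _
    rw [show i - 1 + (e + 1) = i + e by ring]
  rw [h1, h4, h5,
    show i + ((a.length : Int) / 2 - 1) = i - 1 + (a.length : Int) / 2 by ring,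
    show i + (-((a.length : Int) / 2) - 1) = i - 1 - (a.length : Int) / 2 by ring]

lemma loopB_best (f : Int → Int) (k : Nat) (hk : 1 ≤ k) :
    (PySem.List.pyRange 1 (k : Int) 1).foldl
      (fun (b : Int × Int) i => if f i < b.1 then (f i, i) else b) (f 0, 0)
    = match PySem.List.min? ((PySem.List.pyRange 0 (k : Int) 1).map f) (fun x => x) with
      | none => (f 0, 0)
      | some mv => (mv, ((PySem.List.index? ((PySem.List.pyRange 0 (k : Int) 1).map f) mv).getD 0 : Int)) := by
  induction k with
  | zero => omega
  | succ k ih =>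
    by_cases hk1 : 1 ≤ k
    · have hcast : ((k + 1 : Nat) : Int) = (k : Int) + 1 := by push_cast; ring
      rw [hcast, PySem.List.pyRange_one_succ_right (by exact_mod_cast hk1 : (1 : Int) ≤ (k : Int)),
        PySem.List.pyRange_one_succ_right (by positivity : (0 : Int) ≤ (k : Int)),
        List.foldl_append, List.map_append, ih hk1]
      simp only [List.map_cons, List.map_nil, List.foldl_cons, List.foldl_nil]
      cases hmin : PySem.List.min? ((PySem.List.pyRange 0 (k : Int) 1).map f) (fun x => x) with
      | none =>
        have hLnil : (PySem.List.pyRange 0 (k : Int) 1).map f = [] :=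
          (PySem.List.min?_eq_none_iff _ _).mp hmin
        have hlen := congrArg List.length hLnil
        simp only [List.length_map, PySem.List.length_pyRange_one, List.length_nil] at hlen
        omega
      | some mv =>
        have hmem : mv ∈ (PySem.List.pyRange 0 (k : Int) 1).map f := PySem.List.min?_mem hmin
        have hmn : ∀ y ∈ (PySem.List.pyRange 0 (k : Int) 1).map f, mv ≤ y :=
          PySem.List.min?_isMin hmin
        rw [min?_snoc _ (f (k : Int)) mv hmin]
        by_cases hvm : f (k : Int) < mv
        · have hnot : f (k : Int) ∉ (PySem.List.pyRange 0 (k : Int) 1).map f :=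
            fun hc => absurd (hmn _ hc) (by omega)
          rw [min_eq_right (le_of_lt hvm)]
          simp only [hvm, if_pos]
          rw [PySem.List.index?_append_singleton_self _ _ hnot]
          simp only [List.length_map, PySem.List.length_pyRange_one, Option.getD_some]
          simp only [Prod.mk.injEq, true_and]
          omega
        · rw [min_eq_left (not_lt.mp hvm)]
          simp only [hvm]
          rw [PySem.List.index?_append_of_mem [f (k : Int)] hmem]
          simp
    · have hk0 : k = 0 := by omega
      subst hk0
      rw [show ((0 + 1 : Nat) : Int) = 1 from rfl,
        PySem.List.pyRange_one_eq_nil (le_refl (1 : Int)),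
        show PySem.List.pyRange 0 1 1 = [0] from rfl]
      simp only [List.foldl_nil, List.map_cons, List.map_nil]
      rw [show PySem.List.min? [f 0] (fun x => x)
          = some (List.foldl min (f 0) []) from PySem.List.min?_id_cons _ _]
      simp only [List.foldl_nil]
      rw [PySem.List.index?_cons_self]
      simp

lemma loopB_inv (a : List Int) (k : Nat) (hk : k < a.length) :
    (PySem.List.pyRange 1 ((k : Int) + 1) 1).foldl
      (fun (st : Int × Int × Int × Int × Int) i =>
        let c := st.1 + ((a.length : Int) / 2 - 1) * PySem.List.pyGetD a ((i - 1 + (a.length : Int) / 2) % (a.length : Int)) 0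
                   - (a.length : Int) / 2 * PySem.List.pyGetD a ((i - 1 - (a.length : Int) / 2) % (a.length : Int)) 0
                   - st.2.1 + st.2.2.1
        let sp := st.2.1 + PySem.List.pyGetD a ((i + (a.length : Int) / 2 - 1) % (a.length : Int)) 0
                   - PySem.List.pyGetD a (i % (a.length : Int)) 0
        let sm := st.2.2.1 + PySem.List.pyGetD a (i % (a.length : Int)) 0
                   - PySem.List.pyGetD a ((i - (a.length : Int) / 2) % (a.length : Int)) 0
        if c < st.2.2.2.1 then (c, sp, sm, c, i) else (c, sp, sm, st.2.2.2.1, st.2.2.2.2))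
      (pvCost a 0, pvSp a 0, pvSm a 0, pvCost a 0, 0)
    = (pvCost a (k : Int), pvSp a (k : Int), pvSm a (k : Int),
       (PySem.List.pyRange 1 ((k : Int) + 1) 1).foldl
         (fun (b : Int × Int) i => if pvCost a i < b.1 then (pvCost a i, i) else b)
         (pvCost a 0, 0)) := by
  induction k with
  | zero =>
    rw [show ((0 : Nat) : Int) + 1 = 1 by norm_num,
      PySem.List.pyRange_one_eq_nil (le_refl (1 : Int))]
    rfl
  | succ k ih =>
    have hn2 : 2 ≤ (a.length : Int) := by
      have : (k : Int) + 1 < (a.length : Int) := by exact_mod_cast hk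
      omega
    have hcast : ((k + 1 : Nat) : Int) + 1 = ((k : Int) + 1) + 1 := by push_cast; ring
    rw [hcast, PySem.List.pyRange_one_succ_right (by omega : (1 : Int) ≤ (k : Int) + 1),
      List.foldl_append, List.foldl_append, ih (by omega)]
    simp only [List.foldl_cons, List.foldl_nil]
    have hc : pvCost a ((k : Int) + 1)
        = pvCost a (k : Int)
          + ((a.length : Int) / 2 - 1) * PySem.List.pyGetD a (((k : Int) + 1 - 1 + (a.length : Int) / 2) % (a.length : Int)) 0
          - (a.length : Int) / 2 * PySem.List.pyGetD a (((k : Int) + 1 - 1 - (a.length : Int) / 2) % (a.length : Int)) 0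
          - pvSp a (k : Int) + pvSm a (k : Int) := by
      have h := costStep a ((k : Int) + 1) hn2
      rw [show (k : Int) + 1 - 1 = (k : Int) by ring] at h ⊢
      rw [h]
    have hsp : pvSp a ((k : Int) + 1)
        = pvSp a (k : Int)
          + PySem.List.pyGetD a (((k : Int) + 1 + (a.length : Int) / 2 - 1) % (a.length : Int)) 0
          - PySem.List.pyGetD a (((k : Int) + 1) % (a.length : Int)) 0 := by
      have h := spStep a ((k : Int) + 1) hn2
      rw [show (k : Int) + 1 - 1 = (k : Int) by ring] at h
      rw [h]
    have hsm : pvSm a ((k : Int) + 1)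
        = pvSm a (k : Int)
          + PySem.List.pyGetD a (((k : Int) + 1) % (a.length : Int)) 0
          - PySem.List.pyGetD a (((k : Int) + 1 - (a.length : Int) / 2) % (a.length : Int)) 0 := by
      have h := smStep a ((k : Int) + 1) hn2
      rw [show (k : Int) + 1 - 1 = (k : Int) by ring] at h
      rw [h]
    rw [← hc, ← hsp, ← hsm]
    push_cast
    split_ifs with hif <;> rfl

-- ===== VERDICT (by name: the statement is the Claim_ definition above) =====
theorem nonOptimal_spec : Claim_equal_nonOptimal := by
  unfold Claim_equal_nonOptimal
  intro a _ hpre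
  obtain ⟨hne, i0, hi0, hc0⟩ := hpre
  have hn : 0 < a.length := List.length_pos_of_ne_nil hne
  have hnI : 0 < (a.length : Int) := by exact_mod_cast hn
  unfold Spec_nonOptimal
  simp only [nonOptimal, nonOptimal_alt]
  rw [PySem.List.foldl_congr_mem _ _
      (fun (st : Int × Option Int) i =>
        if st.1 > pvCost a i then (pvCost a i, some (i + 1)) else st) _
      (by
        intro acc x hx
        rw [PySem.List.mem_pyRange_one] at hx
        simp only []
        rw [costEq a x hx.1 hx.2])]
  rw [loopA_char (fun i => pvCost a i) a.length]
  rw [PySem.Int.floordiv_eq_ediv_of_pos (by norm_num : (0 : Int) < 2)]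
  simp only [PySem.Int.mod_eq_emod_of_pos hnI]
  have hc0e : ((PySem.List.pyRange (-((a.length : Int) / 2)) ((a.length : Int) / 2) 1).map
      (fun d => |d| * PySem.List.pyGetD a (d % (a.length : Int)) 0)).sum = pvCost a 0 := by
    simp only [pvCost]
    apply congrArg
    apply List.map_congr_left
    intro d _
    rw [zero_add]
  have hsp0 : ((PySem.List.pyRange 1 ((a.length : Int) / 2) 1).map
      (fun e => PySem.List.pyGetD a (e % (a.length : Int)) 0)).sum = pvSp a 0 := by
    simp only [pvSp]
    apply congrArg
    apply List.map_congr_left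
    intro e _
    rw [zero_add]
  have hsm0 : ((PySem.List.pyRange (-((a.length : Int) / 2) + 1) 1 1).map
      (fun e => PySem.List.pyGetD a (e % (a.length : Int)) 0)).sum = pvSm a 0 := by
    simp only [pvSm]
    apply congrArg
    apply List.map_congr_left
    intro e _
    rw [zero_add]
  rw [hc0e, hsp0, hsm0]
  have hinv := loopB_inv a (a.length - 1) (by omega)
  rw [show (((a.length - 1 : Nat) : Int) + 1) = (a.length : Int) by omega] at hinv
  rw [hinv]
  rw [loopB_best (fun i => pvCost a i) a.length (by omega)]
  cases hmin : PySem.List.min?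
      ((PySem.List.pyRange 0 (a.length : Int) 1).map (fun i => pvCost a i)) (fun x => x) with
  | none =>
    have hLnil := (PySem.List.min?_eq_none_iff _ _).mp hmin
    have hlen := congrArg List.length hLnil
    simp only [List.length_map, PySem.List.length_pyRange_one, List.length_nil] at hlen
    omega
  | some mv =>
    have hmem : pvCost a (i0 : Int) ∈
        (PySem.List.pyRange 0 (a.length : Int) 1).map (fun i => pvCost a i) :=
      List.mem_map.mpr ⟨(i0 : Int), by
        rw [PySem.List.mem_pyRange_one]
        exact ⟨by positivity, by exact_mod_cast hi0⟩, rfl⟩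
    have hmv : mv < 9999999 := by
      have := PySem.List.min?_isMin hmin _ hmem
      omega
    simp only []
    rw [if_pos hmv, Option.getD_some]
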